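-- pv_equiv track=rewrite | github.com/SavageDog8/IST4320 | Classhwpermutation.py | value_of_s
-- ===== SOURCE A (Python) =====
-- def print_keys_by_value(value, alphaDict):
--     keys = [key for key, indices in alphaDict.items() if value in indices]
--     return keys
--
-- def value_of_s(alphaDict):
--     combined_keys_string1 = ""
--     combined_keys_string2 = ""
--     combined_keys_string3 = ""
--     combined_keys_string4 = ""
--     combined_keys_string5 = ""
--     combined_keys_string6 = ""
--     combined_keys_string7 = ""
--     combined_keys_string8 = ""
--     combined_keys_string9 = ""
--     combined_keys_string10 = ""
--     combined_keys_string11 = ""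
--     combined_keys_string12 = ""
--
--     for key, indices in alphaDict.items():
--
--
--         if 4 in indices:
--             combined_keys_string1 = ''.join(print_keys_by_value(1, alphaDict) + print_keys_by_value(2, alphaDict) + print_keys_by_value(3, alphaDict) + print_keys_by_value(4, alphaDict))
--             combined_keys_string2 = ''.join(print_keys_by_value(2, alphaDict) + print_keys_by_value(1, alphaDict) + print_keys_by_value(4, alphaDict) + print_keys_by_value(3, alphaDict))
--             combined_keys_string3 = ''.join(print_keys_by_value(3, alphaDict) + print_keys_by_value(4, alphaDict) + print_keys_by_value(1, alphaDict) + print_keys_by_value(2, alphaDict))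
--
--     whole_set = (combined_keys_string1, combined_keys_string2, combined_keys_string3, combined_keys_string4,
--                  combined_keys_string5, combined_keys_string6, combined_keys_string7, combined_keys_string8,
--                  combined_keys_string9,combined_keys_string10,combined_keys_string11,combined_keys_string12)
--
--     filtered_set = tuple(key for key in whole_set if key != "")
--     capitalized_set = tuple(key.capitalize() for key in filtered_set)
--
--     return capitalized_set
-- ===== SOURCE B (Python) =====
-- def value_of_s(alphaDict):
--     # One pass: invert the dict into value -> list of keys (dict order, one entry
--     # per distinct value in a key's indices), instead of twelve full rescans.
--     table = {}
--     for key, indices in alphaDict.items():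
--         for v in dict.fromkeys(indices):
--             table[v] = table.get(v, []) + [key]
--     if 4 not in table:
--         return ()
--     orders = [[1, 2, 3, 4], [2, 1, 4, 3], [3, 4, 1, 2]]
--     strings = [''.join(k for v in order for k in table.get(v, [])) for order in orders]
--     return tuple(s.capitalize() for s in strings if s != "")
-- ===== Notes on version B (the rewrite author's own statement) =====
-- stated objective: faster
-- what changed: B builds an inverted index (value -> keys in dict order) in one pass over the dict and joins three lookups, instead of A's trigger loop that rescans the whole dict twelve times via print_keys_by_value on every key containing 4.
import Mathlib
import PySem

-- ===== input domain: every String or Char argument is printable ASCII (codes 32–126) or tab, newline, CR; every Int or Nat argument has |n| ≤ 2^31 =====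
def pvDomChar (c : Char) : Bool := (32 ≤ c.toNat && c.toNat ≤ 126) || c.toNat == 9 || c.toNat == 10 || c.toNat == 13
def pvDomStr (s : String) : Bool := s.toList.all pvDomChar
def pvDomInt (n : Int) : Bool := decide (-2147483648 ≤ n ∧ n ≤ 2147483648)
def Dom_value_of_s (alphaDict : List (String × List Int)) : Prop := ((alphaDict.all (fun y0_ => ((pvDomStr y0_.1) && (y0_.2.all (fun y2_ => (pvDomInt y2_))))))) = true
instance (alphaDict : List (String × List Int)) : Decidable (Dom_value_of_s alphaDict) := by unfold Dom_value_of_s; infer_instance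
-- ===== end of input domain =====

-- B replaces A's trigger loop with twelve full rescans of the dict by ONE inverted index
-- (value -> keys, built in a single pass) and three joins over it; objective: simpler.

-- shared primitive: Python str.capitalize() — exact on the ASCII domain (first char uppercased, rest lowered)
def pyCapitalize (s : String) : String :=
  match s.toList with
  | [] => String.ofList []
  | c :: cs => String.ofList (PySem.Chars.upperChar c :: PySem.Chars.lower cs)

-- ===== PORT A =====
def print_keys_by_value (value : Int) (alphaDict : List (String × List Int)) : List String :=
  (alphaDict.filter (fun p => p.2.contains value)).map (fun p => p.1)

def value_of_s (alphaDict : List (String × List Int)) : List String :=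
  let st := alphaDict.foldl (fun st kv =>
    if kv.2.contains 4 then
      (PySem.Str.join "" (print_keys_by_value 1 alphaDict ++ print_keys_by_value 2 alphaDict ++ print_keys_by_value 3 alphaDict ++ print_keys_by_value 4 alphaDict),
       PySem.Str.join "" (print_keys_by_value 2 alphaDict ++ print_keys_by_value 1 alphaDict ++ print_keys_by_value 4 alphaDict ++ print_keys_by_value 3 alphaDict),
       PySem.Str.join "" (print_keys_by_value 3 alphaDict ++ print_keys_by_value 4 alphaDict ++ print_keys_by_value 1 alphaDict ++ print_keys_by_value 2 alphaDict))
    else st) (("", "", "") : String × String × String)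
  let whole : List String := [st.1, st.2.1, st.2.2, "", "", "", "", "", "", "", "", ""]
  let filtered := whole.filter (fun k => k != "")
  filtered.map pyCapitalize

-- ===== PORT B =====
def value_of_s_alt (alphaDict : List (String × List Int)) : List String :=
  let table : PySem.Dict Int (List String) :=
    alphaDict.foldl (fun t kv =>
      (PySem.List.dedup kv.2).foldl (fun t v => t.insert v (t.getD v [] ++ [kv.1])) t)
      PySem.Dict.empty
  if table.contains 4 = false then []
  else
    let orders : List (List Int) := [[1,2,3,4],[2,1,4,3],[3,4,1,2]]
    let strings := orders.map (fun ord => PySem.Str.join "" (ord.flatMap (fun v => table.getD v [])))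
    (strings.filter (fun s => s != "")).map pyCapitalize

-- ===== PRECONDITION & SPEC =====
def Spec_value_of_s (alphaDict : List (String × List Int)) (out : List String) : Prop := out = value_of_s_alt alphaDict
instance (alphaDict : List (String × List Int)) (out : List String) : Decidable (Spec_value_of_s alphaDict out) := by unfold Spec_value_of_s; infer_instance

-- ===== CLAIM (what is proved, stated in full; the proofs are below) =====
def Claim_equal_value_of_s : Prop := ∀ (alphaDict : List (String × List Int)), Dom_value_of_s alphaDict → Spec_value_of_s alphaDict (value_of_s alphaDict)

-- ===== LEMMAS AND PROOFS =====
theorem filter_beq_nodup (v : Int) : ∀ (l : List Int), l.Nodup → l.filter (· == v) = if v ∈ l then [v] else [] := by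
  intro l h
  induction l with
  | nil => simp
  | cons a l ih =>
    simp only [List.nodup_cons] at h
    by_cases hav : a = v
    · subst hav
      have : l.filter (· == a) = [] := List.filter_eq_nil_iff.2 (by
        intro x hx hbx
        exact h.1 (by simpa using (beq_iff_eq.mp hbx ▸ hx)))
      simp [this]
    · simp [hav, ih h.2, Ne.symm hav]

def flat (alphaDict : List (String × List Int)) : List (Int × String) :=
  alphaDict.flatMap (fun kv => (PySem.List.dedup kv.2).map (fun v => (v, kv.1)))

theorem insert_eq_modify (kv : String × List Int) :
    (fun (t : PySem.Dict Int (List String)) (v : Int) => t.insert v (t.getD v [] ++ [kv.1]))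
    = (fun t v => t.modify v [] (· ++ [kv.1])) := by
  funext t v
  simp [PySem.Dict.modify]

theorem tbl_flatten (alphaDict : List (String × List Int)) :
    ∀ (d : PySem.Dict Int (List String)),
    alphaDict.foldl (fun t kv => (PySem.List.dedup kv.2).foldl (fun t v => t.insert v (t.getD v [] ++ [kv.1])) t) d
    = (flat alphaDict).foldl (fun t p => t.modify p.1 [] (· ++ [p.2])) d := by
  induction alphaDict with
  | nil => intro d; simp [flat]
  | cons kv rest ih =>
    intro d
    simp only [flat, List.flatMap_cons, List.foldl_append, List.foldl_cons, List.foldl_map]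
    rw [← flat, ← ih, insert_eq_modify]

theorem inner_piece (kv : String × List Int) (v : Int) :
    ((((PySem.List.dedup kv.2).map (fun u => (u, kv.1))).filter (fun p => p.1 == v)).map (fun p => p.2))
    = if kv.2.contains v then [kv.1] else [] := by
  simp only [List.filter_map, Function.comp_def]
  rw [filter_beq_nodup v _ (PySem.List.nodup_dedup kv.2)]
  by_cases hv : v ∈ kv.2
  · simp [hv]
  · simp [hv]

theorem getD_tbl (alphaDict : List (String × List Int)) (v : Int) :
    ((flat alphaDict).foldl (fun t p => t.modify p.1 [] (· ++ [p.2])) PySem.Dict.empty).getD v []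
    = (alphaDict.filter (fun p => p.2.contains v)).map (fun p => p.1) := by
  rw [PySem.Dict.getD_foldl_modify_append]
  simp only [PySem.Dict.getD_empty, List.nil_append]
  induction alphaDict with
  | nil => simp [flat]
  | cons kv rest ih =>
    simp only [flat, List.flatMap_cons, List.filter_append, List.map_append, List.filter_cons] at *
    rw [ih, inner_piece]
    by_cases h : v ∈ kv.2 <;> simp [h]

theorem dedup_contains (l : List Int) (v : Int) : (PySem.List.dedup l).contains v = l.contains v := by
  by_cases h : v ∈ l <;> simp [h]

theorem contains_tbl (alphaDict : List (String × List Int)) (v : Int) :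
    ∀ (d : PySem.Dict Int (List String)),
    ((flat alphaDict).foldl (fun t p => t.modify p.1 [] (· ++ [p.2])) d).contains v
    = (d.contains v || alphaDict.any (fun kv => kv.2.contains v)) := by
  induction alphaDict with
  | nil => intro d; simp [flat]
  | cons kv rest ih =>
    intro d
    simp only [flat, List.flatMap_cons, List.foldl_append, List.foldl_map, List.any_cons]
    rw [← flat, ih]
    have hin : ∀ (l : List Int) (d : PySem.Dict Int (List String)),
        (l.foldl (fun t u => t.modify u [] (· ++ [kv.1])) d).contains v
        = (d.contains v || l.contains v) := by
      intro l
      induction l with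
      | nil => intro d; simp
      | cons a l ihl =>
        intro d
        simp [ihl, PySem.Dict.contains_modify]
        by_cases h : v = a <;> simp [h, Bool.or_comm, Bool.or_left_comm]
    rw [hin, dedup_contains, Bool.or_assoc]

theorem foldl_const_if {α β : Type} (p : β → Bool) (C : α) (l : List β) :
    ∀ (init : α), l.foldl (fun st kv => if p kv then C else st) init
      = if l.any p then C else init := by
  induction l with
  | nil => intro init; simp
  | cons a l ih =>
    intro init
    by_cases h : p a <;> simp [h, ih]

-- ===== VERDICT (by name: the statement is the Claim_ definition above) =====
theorem value_of_s_spec : Claim_equal_value_of_s := by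
  intro alphaDict _
  unfold Spec_value_of_s value_of_s value_of_s_alt
  simp only [tbl_flatten, foldl_const_if, contains_tbl, PySem.Dict.contains_empty, Bool.false_or]
  by_cases h : alphaDict.any (fun kv => kv.2.contains 4)
  · have hb : (alphaDict.any fun kv => kv.2.contains 4) = true := h
    rw [hb]
    simp [getD_tbl, print_keys_by_value, List.filter_cons]
  · have hb : (alphaDict.any fun kv => kv.2.contains 4) = false := by simpa using h
    rw [hb]
    simp
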